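-- pv_equiv track=rewrite | github.com/showhuo/practice | binary-search.py | bsFindLastIndex
-- ===== SOURCE A (Python) =====
-- def bsFindLastIndex(arr,val):
--   low = 0
--   high = len(arr) - 1
--   if arr[high] == val:
--     return high
--   while low <= high:
--     mid = low + (high-low)//2
--     if arr[mid] == val:
--       # 找到其中一个值，检查它的右边
--       if arr[mid+1] != val:
--         return mid
--       else:
--         low = mid + 1
--     elif arr[mid] > val:
--       high = mid - 1
--     else:
--       low = mid + 1
--   return None
-- ===== SOURCE B (Python) =====
-- def bsFindLastIndex(arr, val):
--     # bisect_right-style insertion point, then one comparison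
--     lo, hi = 0, len(arr)
--     while lo < hi:
--         mid = (lo + hi) // 2
--         if arr[mid] <= val:
--             lo = mid + 1
--         else:
--             hi = mid
--     idx = lo - 1
--     return idx if arr[idx] == val else None
-- ===== Notes on version B (the rewrite author's own statement) =====
-- stated objective: idiomatic
-- what changed: Replaces A's three-way binary search with equality branch, right-neighbor check and early last-element test by a bisect_right-style half-open insertion-point loop (no equality test inside the loop) followed by a single comparison at the insertion point.
-- outside the precondition, e.g. on bsFindLastIndex([-1, -2], -1): A returns 0, B returns None; on bsFindLastIndex([], 5): A raises IndexError, B raises IndexError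
import Mathlib
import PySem

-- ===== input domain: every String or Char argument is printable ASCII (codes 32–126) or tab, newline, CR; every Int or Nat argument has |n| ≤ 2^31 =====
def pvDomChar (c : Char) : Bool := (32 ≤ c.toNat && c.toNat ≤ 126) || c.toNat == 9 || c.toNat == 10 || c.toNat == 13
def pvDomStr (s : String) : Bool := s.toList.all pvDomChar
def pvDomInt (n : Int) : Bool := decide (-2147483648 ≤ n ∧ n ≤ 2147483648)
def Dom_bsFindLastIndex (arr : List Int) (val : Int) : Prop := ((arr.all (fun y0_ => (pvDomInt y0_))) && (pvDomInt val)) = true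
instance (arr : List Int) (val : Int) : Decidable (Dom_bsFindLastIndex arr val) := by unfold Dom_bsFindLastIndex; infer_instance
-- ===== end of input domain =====

-- B replaces A's three-way binary search (equality branch + right-neighbor check +
-- special last-element test) by a bisect_right-style insertion-point loop plus one
-- comparison; same O(log n) cost, more idiomatic.

-- ===== PORT A =====
-- the while-loop of A; fuel bounds the iteration count (interval shrinks each step)
def bsAuxA (arr : List Int) (val : Int) (low high : Int) (fuel : Nat) : Option Int :=
  match fuel with
  | 0 => none
  | fuel + 1 =>
    if low ≤ high then
      let mid := low + PySem.Int.floordiv (high - low) 2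
      match PySem.List.pyGet? arr mid with
      | none => none  -- IndexError: outside Pre_
      | some m =>
        if m = val then
          match PySem.List.pyGet? arr (mid + 1) with
          | none => none  -- IndexError: outside Pre_
          | some r => if r ≠ val then some mid else bsAuxA arr val (mid + 1) high fuel
        else if m > val then bsAuxA arr val low (mid - 1) fuel
        else bsAuxA arr val (mid + 1) high fuel
    else none

def bsFindLastIndex (arr : List Int) (val : Int) : Option Int :=
  let high : Int := (arr.length : Int) - 1
  match PySem.List.pyGet? arr high with
  | none => none  -- IndexError on the empty list: outside Pre_
  | some h => if h = val then some high else bsAuxA arr val 0 high (arr.length + 1)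

-- ===== PORT B =====
-- the bisect_right-style loop of Source B
def bsAuxB (arr : List Int) (val : Int) (lo hi : Int) (fuel : Nat) : Int :=
  match fuel with
  | 0 => lo
  | fuel + 1 =>
    if lo < hi then
      let mid := PySem.Int.floordiv (lo + hi) 2
      match PySem.List.pyGet? arr mid with
      | none => lo  -- unreachable for 0 ≤ lo < hi ≤ len
      | some m => if m ≤ val then bsAuxB arr val (mid + 1) hi fuel else bsAuxB arr val lo mid fuel
    else lo

def bsFindLastIndex_alt (arr : List Int) (val : Int) : Option Int :=
  let idx := bsAuxB arr val 0 (arr.length : Int) (arr.length + 1) - 1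
  match PySem.List.pyGet? arr idx with
  | none => none  -- IndexError on the empty list: outside Pre_
  | some v => if v = val then some idx else none

-- ===== PRECONDITION & SPEC =====
-- Pre_ excludes the empty list, on which both programs raise IndexError, and unsorted
-- lists that contain val, on which the index A returns is an accident of its probe
-- sequence (binary search's contract requires a sorted list; when val is absent both
-- return None on any list, so those inputs stay inside).
def Pre_bsFindLastIndex (arr : List Int) (val : Int) : Prop :=
  arr ≠ [] ∧ (List.Pairwise (· ≤ ·) arr ∨ val ∉ arr)
instance (arr : List Int) (val : Int) : Decidable (Pre_bsFindLastIndex arr val) := by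
  unfold Pre_bsFindLastIndex; infer_instance

def pvWitness_bsFindLastIndex : List Int × Int := ([1, 2, 2, 5], 2)

def Spec_bsFindLastIndex (arr : List Int) (val : Int) (out : Option Int) : Prop := out = bsFindLastIndex_alt arr val
instance (arr : List Int) (val : Int) (out : Option Int) : Decidable (Spec_bsFindLastIndex arr val out) := by unfold Spec_bsFindLastIndex; infer_instance

-- ===== CLAIM (what is proved, stated in full; the proofs are below) =====
def Claim_equal_bsFindLastIndex : Prop := ∀ (arr : List Int) (val : Int), Dom_bsFindLastIndex arr val → Pre_bsFindLastIndex arr val → Spec_bsFindLastIndex arr val (bsFindLastIndex arr val)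

-- ===== LEMMAS AND PROOFS =====

-- number of elements ≤ val; for a sorted list this is bisect_right's insertion point
def pvCnt (arr : List Int) (val : Int) : Nat := arr.countP (fun x => decide (x ≤ val))

-- common closed form both programs are reduced to
def pvLast (arr : List Int) (val : Int) : Option Int :=
  if 0 < pvCnt arr val ∧ arr.getD (pvCnt arr val - 1) 0 = val
  then some ((pvCnt arr val : Int) - 1) else none

theorem pvCnt_le_length (arr : List Int) (val : Int) : pvCnt arr val ≤ arr.length :=
  List.countP_le_length

-- characterization of pvCnt on a sorted list
theorem pvCnt_char (arr : List Int) (val : Int) (hs : List.Pairwise (· ≤ ·) arr) :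
    ∀ i : Nat, i < arr.length → (arr.getD i 0 ≤ val ↔ i < pvCnt arr val) := by
  induction arr with
  | nil => intro i h; simp at h
  | cons a l ih =>
    rcases List.pairwise_cons.mp hs with ⟨ha, hl⟩
    intro i hi
    by_cases hav : a ≤ val
    · have : pvCnt (a :: l) val = pvCnt l val + 1 := by
        simp [pvCnt, List.countP_cons, hav]
      rw [this]
      cases i with
      | zero => simp [hav]
      | succ j =>
        have hj := ih hl j (by simpa using hi)
        rw [List.getD_cons_succ, hj]
        omega
    · have hcl : pvCnt l val = 0 := by
        simp only [pvCnt, List.countP_eq_zero]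
        intro x hx
        have := ha x hx
        simp only [decide_eq_true_eq]
        omega
      have : pvCnt (a :: l) val = 0 := by
        simp [pvCnt, List.countP_cons, hav, pvCnt] at hcl ⊢
        exact hcl
      rw [this]
      cases i with
      | zero => simpa using hav
      | succ j =>
        have hj : j < l.length := by simpa using hi
        rw [List.getD_cons_succ]
        constructor
        · intro hle
          exfalso
          have hmem : l.getD j 0 ∈ l := by
            have : l.getD j 0 = l[j] := List.getD_eq_getElem l 0 hj
            rw [this]; exact List.getElem_mem hj
          have := ha _ hmem
          omega
        · omega

-- monotonicity on a sorted list
theorem pvMono (arr : List Int) (hs : List.Pairwise (· ≤ ·) arr) :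
    ∀ i j : Nat, i ≤ j → j < arr.length → arr.getD i 0 ≤ arr.getD j 0 := by
  intro i j hij hj
  rcases Nat.eq_or_lt_of_le hij with rfl | hlt
  · exact le_refl _
  · have hi : i < arr.length := lt_trans hlt hj
    have := (List.pairwise_iff_getElem.mp hs) i j hi hj hlt
    rw [List.getD_eq_getElem arr 0 hi, List.getD_eq_getElem arr 0 hj]
    exact this

theorem pyGet?_getD (arr : List Int) (i : Int) (h0 : 0 ≤ i) (h : i < (arr.length : Int)) :
    PySem.List.pyGet? arr i = some (arr.getD i.toNat 0) := by
  rw [PySem.List.pyGet?_eq_some_getElem arr h0 h]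
  congr 1
  exact (List.getD_eq_getElem arr 0 (by omega)).symm

-- B's loop computes the insertion point
theorem bsAuxB_eq (arr : List Int) (val : Int) (hs : List.Pairwise (· ≤ ·) arr) :
    ∀ fuel : Nat, ∀ lo hi : Int, 0 ≤ lo → lo ≤ (pvCnt arr val : Int) →
      (pvCnt arr val : Int) ≤ hi → hi ≤ (arr.length : Int) →
      (hi - lo).toNat ≤ fuel → bsAuxB arr val lo hi fuel = (pvCnt arr val : Int) := by
  intro fuel
  induction fuel with
  | zero => intro lo hi h0 h1 h2 h3 hf; unfold bsAuxB; omega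
  | succ fuel ih =>
    intro lo hi h0 h1 h2 h3 hf
    unfold bsAuxB
    by_cases hlh : lo < hi
    · simp only [hlh, if_true]
      have hmid : lo ≤ PySem.Int.floordiv (lo + hi) 2 ∧ PySem.Int.floordiv (lo + hi) 2 < hi := by
        rw [PySem.Int.floordiv_eq_ediv_of_pos (by omega)]
        omega
      set mid := PySem.Int.floordiv (lo + hi) 2 with hmdef
      have hget := pyGet?_getD arr mid (by omega) (by omega)
      rw [hget]
      simp only
      by_cases hle : arr.getD mid.toNat 0 ≤ val
      · have hmc : mid < (pvCnt arr val : Int) := by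
          have := (pvCnt_char arr val hs mid.toNat (by omega)).mp hle
          omega
        simp only [hle, if_true]
        exact ih (mid + 1) hi (by omega) (by omega) h2 h3 (by omega)
      · have hmc : (pvCnt arr val : Int) ≤ mid := by
          by_contra hcon
          exact hle ((pvCnt_char arr val hs mid.toNat (by omega)).mpr (by omega))
        simp only [hle, if_false]
        exact ih lo mid h0 h1 (by omega) (by omega) (by omega)
    · simp only [hlh, if_false]; omega

-- A's loop, value absent
theorem bsAuxA_absent (arr : List Int) (val : Int)
    (habs : ∀ i : Nat, i < arr.length → arr.getD i 0 ≠ val) :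
    ∀ fuel : Nat, ∀ lo hi : Int, 0 ≤ lo → hi ≤ (arr.length : Int) - 1 →
      (hi - lo + 1).toNat ≤ fuel → bsAuxA arr val lo hi fuel = none := by
  intro fuel
  induction fuel with
  | zero => intro lo hi h0 h1 hf; rfl
  | succ fuel ih =>
    intro lo hi h0 h1 hf
    unfold bsAuxA
    by_cases hlh : lo ≤ hi
    · simp only [hlh, if_true]
      have hmid : lo ≤ lo + PySem.Int.floordiv (hi - lo) 2 ∧
          lo + PySem.Int.floordiv (hi - lo) 2 ≤ hi := by
        rw [PySem.Int.floordiv_eq_ediv_of_pos (by omega)]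
        omega
      set mid := lo + PySem.Int.floordiv (hi - lo) 2 with hmdef
      have hget := pyGet?_getD arr mid (by omega) (by omega)
      rw [hget]
      simp only
      have hne : ¬ (arr.getD mid.toNat 0 = val) := habs mid.toNat (by omega)
      simp only [hne, if_false]
      by_cases hgt : arr.getD mid.toNat 0 > val
      · simp only [hgt, if_true]
        exact ih lo (mid - 1) h0 (by omega) (by omega)
      · simp only [hgt, if_false]
        exact ih (mid + 1) hi (by omega) h1 (by omega)
    · simp only [hlh, if_false]

-- A's loop, value present with last occurrence pvCnt-1 strictly before the last element
theorem bsAuxA_found (arr : List Int) (val : Int) (hs : List.Pairwise (· ≤ ·) arr)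
    (hc : 0 < pvCnt arr val) (hv : arr.getD (pvCnt arr val - 1) 0 = val)
    (hlast : (pvCnt arr val : Int) - 1 < (arr.length : Int) - 1) :
    ∀ fuel : Nat, ∀ lo hi : Int, 0 ≤ lo → lo ≤ (pvCnt arr val : Int) - 1 →
      (pvCnt arr val : Int) - 1 ≤ hi → hi ≤ (arr.length : Int) - 1 →
      (hi - lo).toNat < fuel → bsAuxA arr val lo hi fuel = some ((pvCnt arr val : Int) - 1) := by
  intro fuel
  induction fuel with
  | zero => intro lo hi h0 h1 h2 h3 hf; omega
  | succ fuel ih =>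
    intro lo hi h0 h1 h2 h3 hf
    have hcl := pvCnt_le_length arr val
    unfold bsAuxA
    have hlh : lo ≤ hi := by omega
    simp only [hlh, if_true]
    have hmid : lo ≤ lo + PySem.Int.floordiv (hi - lo) 2 ∧
        lo + PySem.Int.floordiv (hi - lo) 2 ≤ hi := by
      rw [PySem.Int.floordiv_eq_ediv_of_pos (by omega)]
      omega
    set mid := lo + PySem.Int.floordiv (hi - lo) 2 with hmdef
    have hget := pyGet?_getD arr mid (by omega) (by omega)
    rw [hget]
    simp only
    by_cases heq : arr.getD mid.toNat 0 = val
    · -- arr[mid] = val ⇒ mid ≤ cnt-1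
      have hmlt : mid < (pvCnt arr val : Int) := by
        have := (pvCnt_char arr val hs mid.toNat (by omega)).mp (by rw [heq])
        omega
      simp only [heq, if_true]
      have hget1 := pyGet?_getD arr (mid + 1) (by omega) (by omega)
      rw [hget1]
      simp only
      by_cases hr : arr.getD (mid + 1).toNat 0 = val
      · -- right neighbor also val ⇒ mid+1 ≤ cnt-1, recurse right
        have : (mid + 1) < (pvCnt arr val : Int) := by
          have := (pvCnt_char arr val hs (mid + 1).toNat (by omega)).mp (by rw [hr])
          omega
        rw [if_neg (not_not_intro hr)]
        exact ih (mid + 1) hi (by omega) (by omega) h2 h3 (by omega)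
      · -- right neighbor differs ⇒ mid = cnt-1
        have hmeq : mid = (pvCnt arr val : Int) - 1 := by
          by_contra hcon
          have hmlt' : mid < (pvCnt arr val : Int) - 1 := by omega
          -- then mid+1 ≤ cnt-1, so val = arr[mid] ≤ arr[mid+1] ≤ arr[cnt-1] = val
          have hle1 : arr.getD (mid + 1).toNat 0 ≤ val := by
            have := pvMono arr hs (mid + 1).toNat (pvCnt arr val - 1) (by omega) (by omega)
            omega
          have hge1 : val ≤ arr.getD (mid + 1).toNat 0 := by
            have := pvMono arr hs mid.toNat (mid + 1).toNat (by omega) (by omega)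
            omega
          exact hr (by omega)
        simp only [ne_eq, hr, not_false_iff, if_true]
        rw [hmeq]
    · simp only [heq, if_false]
      by_cases hgt : arr.getD mid.toNat 0 > val
      · -- cnt ≤ mid
        have : (pvCnt arr val : Int) ≤ mid := by
          by_contra hcon
          have := (pvCnt_char arr val hs mid.toNat (by omega)).mpr (by omega)
          omega
        simp only [hgt, if_true]
        exact ih lo (mid - 1) h0 h1 (by omega) (by omega) (by omega)
      · -- arr[mid] < val ⇒ mid < cnt-1 (mid = cnt-1 would give arr[mid] = val)
        have hlt : arr.getD mid.toNat 0 < val := by omega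
        have hmlt : mid < (pvCnt arr val : Int) := by
          have := (pvCnt_char arr val hs mid.toNat (by omega)).mp (by omega)
          omega
        have hne' : mid ≠ (pvCnt arr val : Int) - 1 := by
          intro hcon
          have : mid.toNat = pvCnt arr val - 1 := by omega
          rw [this, hv] at hlt
          omega
        simp only [hgt, if_false]
        exact ih (mid + 1) hi (by omega) (by omega) h2 h3 (by omega)

theorem alt_eq_pvLast (arr : List Int) (val : Int) (hne : arr ≠ []) (hs : List.Pairwise (· ≤ ·) arr) :
    bsFindLastIndex_alt arr val = pvLast arr val := by
  have hlen : 0 < arr.length := List.length_pos_iff.mpr hne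
  have hcl := pvCnt_le_length arr val
  simp only [bsFindLastIndex_alt]
  have hB := bsAuxB_eq arr val hs (arr.length + 1) 0 (arr.length : Int)
    (by omega) (by omega) (by omega) (by omega) (by omega)
  rw [hB]
  by_cases hc : 0 < pvCnt arr val
  · have hget := pyGet?_getD arr ((pvCnt arr val : Int) - 1) (by omega) (by omega)
    have : ((pvCnt arr val : Int) - 1).toNat = pvCnt arr val - 1 := by omega
    rw [this] at hget
    rw [hget]
    simp only [pvLast]
    by_cases hv : arr.getD (pvCnt arr val - 1) 0 = val
    · simp [hv, hc]
    · simp [hv, hc]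
  · -- cnt = 0: idx = -1 reads the last element, which is > val
    have hc0 : pvCnt arr val = 0 := by omega
    rw [hc0]
    simp only [Nat.cast_zero, zero_sub]
    have hgl : PySem.List.pyGet? arr (-1) = some (arr.getD (arr.length - 1) 0) := by
      have := PySem.List.pyGet?_neg_one (xs := arr)
      rw [this]
      rw [List.getLast?_eq_getElem?]
      rw [List.getElem?_eq_getElem (by omega)]
      congr 1
      exact (List.getD_eq_getElem arr 0 (by omega)).symm
    rw [hgl]
    have hvne : arr.getD (arr.length - 1) 0 ≠ val := by
      intro hcon
      have := (pvCnt_char arr val hs (arr.length - 1) (by omega)).mp (le_of_eq hcon)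
      omega
    show (if arr.getD (arr.length - 1) 0 = val then some (-1 : Int) else none) = pvLast arr val
    rw [if_neg hvne]
    simp [pvLast, hc0]

theorem a_eq_pvLast (arr : List Int) (val : Int) (hne : arr ≠ []) (hs : List.Pairwise (· ≤ ·) arr) :
    bsFindLastIndex arr val = pvLast arr val := by
  have hlen : 0 < arr.length := List.length_pos_iff.mpr hne
  have hcl := pvCnt_le_length arr val
  simp only [bsFindLastIndex]
  have hget := pyGet?_getD arr ((arr.length : Int) - 1) (by omega) (by omega)
  have htn : ((arr.length : Int) - 1).toNat = arr.length - 1 := by omega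
  rw [htn] at hget
  rw [hget]
  simp only
  by_cases hlv : arr.getD (arr.length - 1) 0 = val
  · -- last element is val ⇒ cnt = len
    have hcf : pvCnt arr val = arr.length := by
      have h1 := (pvCnt_char arr val hs (arr.length - 1) (by omega)).mp (le_of_eq hlv)
      omega
    rw [if_pos hlv]
    simp only [pvLast, hcf]
    rw [if_pos ⟨hlen, hlv⟩]
  · rw [if_neg hlv]
    by_cases hpres : 0 < pvCnt arr val ∧ arr.getD (pvCnt arr val - 1) 0 = val
    · -- present; last occurrence is cnt-1 < len-1
      have hlast : (pvCnt arr val : Int) - 1 < (arr.length : Int) - 1 := by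
        rcases hpres with ⟨hc, hv⟩
        by_contra hcon
        have : pvCnt arr val - 1 = arr.length - 1 := by omega
        rw [this] at hv
        exact hlv hv
      have hA := bsAuxA_found arr val hs hpres.1 hpres.2 hlast (arr.length + 1) 0
        ((arr.length : Int) - 1) (by omega) (by omega) (by omega) (by omega) (by omega)
      rw [hA]
      simp only [pvLast]
      rw [if_pos hpres]
    · -- absent everywhere
      have habs : ∀ i : Nat, i < arr.length → arr.getD i 0 ≠ val := by
        intro i hi hcon
        have hic : i < pvCnt arr val :=
          (pvCnt_char arr val hs i hi).mp (le_of_eq hcon)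
        have hc : 0 < pvCnt arr val := by omega
        have hle : arr.getD (pvCnt arr val - 1) 0 ≤ val :=
          (pvCnt_char arr val hs (pvCnt arr val - 1) (by omega)).mpr (by omega)
        have hge : val ≤ arr.getD (pvCnt arr val - 1) 0 := by
          have := pvMono arr hs i (pvCnt arr val - 1) (by omega) (by omega)
          omega
        exact hpres ⟨hc, by omega⟩
      have hA := bsAuxA_absent arr val habs (arr.length + 1) 0 ((arr.length : Int) - 1)
        (by omega) (by omega) (by omega)
      rw [hA]
      simp only [pvLast]
      rw [if_neg]
      intro ⟨hc, hv⟩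
      exact habs (pvCnt arr val - 1) (by omega) hv

-- when val is absent, A's loop can only return None (it returns an index only on equality)
theorem a_none_absent (arr : List Int) (val : Int) (hne : arr ≠ []) (habs : val ∉ arr) :
    bsFindLastIndex arr val = none := by
  have hlen : 0 < arr.length := List.length_pos_iff.mpr hne
  have habs' : ∀ i : Nat, i < arr.length → arr.getD i 0 ≠ val := by
    intro i hi hcon
    rw [List.getD_eq_getElem arr 0 hi] at hcon
    exact habs (hcon ▸ List.getElem_mem hi)
  simp only [bsFindLastIndex]
  have hget := pyGet?_getD arr ((arr.length : Int) - 1) (by omega) (by omega)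
  have htn : ((arr.length : Int) - 1).toNat = arr.length - 1 := by omega
  rw [htn] at hget
  rw [hget]
  show (if arr.getD (arr.length - 1) 0 = val then some ((arr.length : Int) - 1)
    else bsAuxA arr val 0 ((arr.length : Int) - 1) (arr.length + 1)) = none
  rw [if_neg (habs' (arr.length - 1) (by omega))]
  exact bsAuxA_absent arr val habs' (arr.length + 1) 0 ((arr.length : Int) - 1)
    (by omega) (by omega) (by omega)

-- when val is absent, B's final comparison fails whatever index the loop produced
theorem alt_none_absent (arr : List Int) (val : Int) (habs : val ∉ arr) :
    bsFindLastIndex_alt arr val = none := by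
  simp only [bsFindLastIndex_alt]
  cases hget : PySem.List.pyGet? arr (bsAuxB arr val 0 (arr.length : Int) (arr.length + 1) - 1) with
  | none => rfl
  | some v =>
    have hv : v ∈ arr := PySem.List.mem_of_pyGet?_eq_some arr hget
    show (if v = val then some (bsAuxB arr val 0 (arr.length : Int) (arr.length + 1) - 1)
      else none) = none
    rw [if_neg (fun hcon : v = val => habs (hcon ▸ hv))]

-- ===== VERDICT (by name: the statement is the Claim_ definition above) =====
theorem bsFindLastIndex_spec : Claim_equal_bsFindLastIndex := by
  intro arr val _hdom hpre
  unfold Spec_bsFindLastIndex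
  rcases hpre with ⟨hne, hs | habs⟩
  · rw [a_eq_pvLast arr val hne hs, alt_eq_pvLast arr val hne hs]
  · rw [a_none_absent arr val hne habs, alt_none_absent arr val habs]
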